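-- pv_equiv track=rewrite | github.com/grapheneaffiliate/h4-polytopic-attention | solve_arc_b12.py | solve_834ec97d
-- ===== SOURCE A (Python) =====
-- def solve_834ec97d(grid):
--     rows = len(grid)
--     cols = len(grid[0])
--     out = [[0]*cols for _ in range(rows)]
--
--     # Find the non-zero pixel
--     pr, pc, pval = -1, -1, 0
--     for r in range(rows):
--         for c in range(cols):
--             if grid[r][c] != 0:
--                 pr, pc, pval = r, c, grid[r][c]
--
--     # Fill rows 0 to pr with 4s at columns with same parity as pc
--     parity = pc % 2
--     for r in range(pr + 1):
--         for c in range(cols):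
--             if c % 2 == parity:
--                 out[r][c] = 4
--
--     # Place original pixel one row below
--     if pr + 1 < rows:
--         out[pr + 1][pc] = pval
--
--     return out
-- ===== SOURCE B (Python) =====
-- def solve_834ec97d(grid):
--     rows, cols = len(grid), len(grid[0])
--     # Work on the flattened (row-major) grid: 1-D index arithmetic replaces 2-D loops.
--     flat = [row[c] for row in grid for c in range(cols)]
--     idx = next((i for i in reversed(range(rows * cols)) if flat[i] != 0), -1)
--     pr, pc = divmod(idx, cols)
--     pval = flat[idx] if idx >= 0 else 0
--     parity = pc % 2
--     filled = (pr + 1) * cols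
--     outflat = [4 if (i % cols) % 2 == parity else 0 for i in range(filled)]
--     outflat += [0] * (rows * cols - filled)
--     if pr + 1 < rows:
--         outflat[filled + pc] = pval
--     return [outflat[r * cols:(r + 1) * cols] for r in range(rows)]
-- ===== Notes on version B (the rewrite author's own statement) =====
-- stated objective: alternative
-- what changed: B works on the flattened row-major grid: it finds the winning pixel as the last nonzero index of a 1-D list, recovers (row, col) with divmod, builds the whole output as one flat list by index arithmetic ((i % cols) parity) with a single flat write for the dropped pixel, and reshapes at the end - instead of A's 2-D nested scan-and-fill loops over a preallocated matrix.
import Mathlib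
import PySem

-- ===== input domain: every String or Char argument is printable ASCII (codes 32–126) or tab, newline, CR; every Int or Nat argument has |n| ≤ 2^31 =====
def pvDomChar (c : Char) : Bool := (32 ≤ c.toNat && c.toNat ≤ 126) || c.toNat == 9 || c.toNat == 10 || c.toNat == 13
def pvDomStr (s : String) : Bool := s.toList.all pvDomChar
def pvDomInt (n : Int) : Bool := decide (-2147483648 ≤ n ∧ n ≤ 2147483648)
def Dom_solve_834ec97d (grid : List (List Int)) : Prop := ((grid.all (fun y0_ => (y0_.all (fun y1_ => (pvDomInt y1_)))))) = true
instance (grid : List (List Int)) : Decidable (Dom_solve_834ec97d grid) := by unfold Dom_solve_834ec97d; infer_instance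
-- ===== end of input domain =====

-- B works on the flattened row-major grid — last nonzero index of a 1-D list, divmod
-- coordinates, one flat output list built by index arithmetic, reshaped at the end —
-- instead of A's 2-D nested scan-and-fill loops (objective: alternative, same cost).

-- Python `out[r][c] = v` with negative-index wraparound (A performs it once at the
-- end; out of range would be an IndexError, excluded by Pre_, so the no-op default is unreachable).
def pySet2 (out : List (List Int)) (r c v : Int) : List (List Int) :=
  let r' := if r < 0 then r + out.length else r
  if 0 ≤ r' ∧ r'.toNat < out.length then
    out.set r'.toNat
      (let row := out.getD r'.toNat []
       let c' := if c < 0 then c + row.length else c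
       if 0 ≤ c' ∧ c'.toNat < row.length then row.set c'.toNat v else row)
  else out

-- ===== PORT A =====
def solve_834ec97d (grid : List (List Int)) : List (List Int) :=
  let rows := grid.length
  let cols := (grid.headD []).length
  let out : List (List Int) := List.replicate rows (List.replicate cols (0 : Int))
  -- find the non-zero pixel (last hit wins)
  let p : Int × Int × Int :=
    (List.range rows).foldl (fun st (r : Nat) =>
      (List.range cols).foldl (fun st (c : Nat) =>
        if (grid.getD r []).getD c 0 ≠ 0 then ((r : Int), (c : Int), (grid.getD r []).getD c 0)
        else st) st)
      (-1, -1, 0)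
  let pr := p.1
  let pc := p.2.1
  let pval := p.2.2
  -- fill rows 0..pr with 4s at columns with the same parity as pc
  let parity := PySem.Int.mod pc 2
  let out :=
    (List.range (pr + 1).toNat).foldl (fun out (r : Nat) =>
      (List.range cols).foldl (fun out (c : Nat) =>
        if ((c : Int)) % 2 = parity then out.set r ((out.getD r []).set c 4) else out) out) out
  -- place original pixel one row below
  if pr + 1 < (rows : Int) then pySet2 out (pr + 1) pc pval else out

-- ===== PORT B =====
def solve_834ec97d_alt (grid : List (List Int)) : List (List Int) :=
  let rows := grid.length
  let cols := (grid.headD []).length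
  -- flat = [row[c] for row in grid for c in range(cols)]
  let flat := grid.flatMap (fun row => (List.range cols).map (fun c => row.getD c 0))
  -- idx = next((i for i in reversed(range(rows*cols)) if flat[i] != 0), -1)
  let idx : Int :=
    match (List.range (rows * cols)).reverse.find? (fun i => flat.getD i 0 != 0) with
    | some i => (i : Int)
    | none => -1
  -- pr, pc = divmod(idx, cols)
  let pr := PySem.Int.floordiv idx (cols : Int)
  let pc := PySem.Int.mod idx (cols : Int)
  let pval := if 0 ≤ idx then flat.getD idx.toNat 0 else 0
  let parity := PySem.Int.mod pc 2
  let filled := ((pr + 1) * (cols : Int)).toNat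
  let outflat := (List.range filled).map
      (fun (i : Nat) => if ((i % cols : Nat) : Int) % 2 = parity then (4 : Int) else 0)
    ++ List.replicate (rows * cols - filled) (0 : Int)
  -- outflat[filled + pc] = pval  (pc ≥ 0 here; in range on every input Pre_ admits)
  let outflat := if pr + 1 < (rows : Int) then outflat.set (filled + pc.toNat) pval else outflat
  -- [outflat[r*cols:(r+1)*cols] for r in range(rows)]  (xs[a:b], 0 ≤ a ≤ b: drop/take, PySem.List.slice_natCast_add)
  (List.range rows).map (fun r => (outflat.drop (r * cols)).take cols)

-- ===== PRECONDITION & SPEC =====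
-- Exactly where Python A returns: a nonempty grid whose first row is nonempty and whose every
-- row has at least cols = len(grid[0]) entries (otherwise A raises IndexError).
def Pre_solve_834ec97d (grid : List (List Int)) : Prop :=
  grid ≠ [] ∧ 0 < (grid.headD []).length ∧ ∀ row ∈ grid, (grid.headD []).length ≤ row.length
instance (grid : List (List Int)) : Decidable (Pre_solve_834ec97d grid) := by
  unfold Pre_solve_834ec97d; infer_instance

def pvWitness_solve_834ec97d : List (List Int) := [[0, 0, 0], [0, 3, 0], [0, 0, 0]]

def Spec_solve_834ec97d (grid : List (List Int)) (out : List (List Int)) : Prop :=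
  out = solve_834ec97d_alt grid
instance (grid : List (List Int)) (out : List (List Int)) : Decidable (Spec_solve_834ec97d grid out) := by
  unfold Spec_solve_834ec97d; infer_instance

-- ===== CLAIM (what is proved, stated in full; the proofs are below) =====
def Claim_equal_solve_834ec97d : Prop :=
  ∀ (grid : List (List Int)), Dom_solve_834ec97d grid → Pre_solve_834ec97d grid →
    Spec_solve_834ec97d grid (solve_834ec97d grid)

-- ===== LEMMAS AND PROOFS =====

-- "keep the last hit" fold = "first hit of the reverse" lookup
theorem foldl_getD_eq_findSome?_reverse {β γ : Type} (l : List β) (g : β → Option γ) (init : γ) :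
    l.foldl (fun st x => (g x).getD st) init = (l.reverse.findSome? g).getD init := by
  induction l generalizing init with
  | nil => simp
  | cons a l ih =>
      simp only [List.foldl_cons, List.reverse_cons, List.findSome?_append, ih]
      cases h : l.reverse.findSome? g <;> simp

-- findSome? of a guarded some is find? mapped
theorem findSome?_ite {β γ : Type} (l : List β) (p : β → Bool) (f : β → γ) :
    l.findSome? (fun x => if p x then some (f x) else none) = (l.find? p).map f := by
  induction l with
  | nil => rfl
  | cons a l ih => by_cases h : p a <;> simp [h, ih]

-- row-major flattening of a rectangle of indices
theorem range_mul_flatMap (m n : Nat) :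
    List.range (m * n) = (List.range m).flatMap (fun r => (List.range n).map (fun c => r * n + c)) := by
  induction m with
  | zero => simp
  | succ m ih =>
      rw [Nat.succ_mul, List.range_add, ih, List.range_succ, List.flatMap_append]
      simp [Nat.add_comm]

theorem findSome?_flatMap {α β γ : Type} (l : List α) (g : α → List β) (f : β → Option γ) :
    (l.flatMap g).findSome? f = l.findSome? (fun x => (g x).findSome? f) := by
  induction l with
  | nil => rfl
  | cons a l ih =>
      rw [List.flatMap_cons, List.findSome?_append, List.findSome?_cons]
      cases h : (g a).findSome? f <;> simp [ih]

theorem findSome?_congr {β γ : Type} (l : List β) (f g : β → Option γ)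
    (h : ∀ x ∈ l, f x = g x) : l.findSome? f = l.findSome? g := by
  induction l with
  | nil => rfl
  | cons a l ih =>
      rw [List.findSome?_cons, List.findSome?_cons, h a (by simp), ih (fun x hx => h x (by simp [hx]))]

theorem rc_div (r cols c : Nat) (h : c < cols) : (r * cols + c) / cols = r := by
  rw [Nat.add_comm, Nat.add_mul_div_right _ _ (by omega), Nat.div_eq_of_lt h]; omega

theorem rc_mod (r cols c : Nat) (h : c < cols) : (r * cols + c) % cols = c := by
  rw [Nat.add_comm, Nat.add_mul_mod_self_right]; exact Nat.mod_eq_of_lt h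

theorem rc_lt (r cols c k : Nat) (h : c < cols) : r * cols + c < k * cols ↔ r < k := by
  constructor
  · intro hlt
    by_contra hk
    have : k * cols ≤ r * cols := Nat.mul_le_mul_right _ (by omega)
    omega
  · intro hr
    have : (r + 1) * cols ≤ k * cols := Nat.mul_le_mul_right _ hr
    have : r * cols + cols ≤ k * cols := by rw [← Nat.succ_mul]; exact this
    omega

theorem rc_eq (r cols c R C : Nat) (hc : c < cols) (hC : C < cols) :
    r * cols + c = R * cols + C ↔ r = R ∧ c = C := by
  constructor
  · intro h
    have h1 : (r * cols + c) / cols = (R * cols + C) / cols := by rw [h]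
    have h2 : (r * cols + c) % cols = (R * cols + C) % cols := by rw [h]
    rw [rc_div _ _ _ hc, rc_div _ _ _ hC] at h1
    rw [rc_mod _ _ _ hc, rc_mod _ _ _ hC] at h2
    exact ⟨h1, h2⟩
  · rintro ⟨rfl, rfl⟩; rfl

-- the j-th element of the flattened grid is cell (j / cols, j % cols)
theorem flat_getD (L : List (List Int)) (cols : Nat) (r c : Nat) (hc : c < cols) :
    (L.flatMap (fun row => (List.range cols).map (fun k => row.getD k 0))).getD (r * cols + c) 0
      = (L.getD r []).getD c 0 := by
  induction L generalizing r with
  | nil => simp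
  | cons h t ih =>
      cases r with
      | zero =>
          simp only [List.flatMap_cons, Nat.zero_mul, Nat.zero_add]
          rw [List.getD_eq_getElem?_getD, List.getElem?_append_left (by simpa using hc)]
          simp [hc, List.getD_eq_getElem?_getD]
      | succ r =>
          have harith : (r + 1) * cols + c = cols + (r * cols + c) := by ring
          simp only [List.flatMap_cons, harith]
          rw [List.getD_eq_getElem?_getD, List.getElem?_append_right (by simp),
              ← List.getD_eq_getElem?_getD]
          simp only [List.length_map, List.length_range, Nat.add_sub_cancel_left]
          rw [ih r]
          simp [List.getD_eq_getElem?_getD]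

theorem flat_length (L : List (List Int)) (cols : Nat) :
    (L.flatMap (fun row => (List.range cols).map (fun k => row.getD k 0))).length
      = L.length * cols := by
  induction L with
  | nil => simp
  | cons h t ih => simp [List.flatMap_cons, Nat.succ_mul, Nat.add_comm]

-- the set-folds preserve the length of the list being updated
theorem foldl_set_length {α : Type} (L : List Nat) (f : List α → Nat → List α)
    (hf : ∀ l i, (f l i).length = l.length) (l : List α) :
    (L.foldl f l).length = l.length := by
  induction L generalizing l with
  | nil => rfl
  | cons a L ih => simp [List.foldl_cons, ih, hf]

-- pointwise value of the inner fill loop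
theorem inner_fill_getD (P : Nat → Prop) [DecidablePred P] (L : List Nat) (l : List Int)
    (j : Nat) (hj : j < l.length) :
    ((L.foldl (fun row c => if P c then row.set c 4 else row) l).getD j 0) =
      if j ∈ L ∧ P j then 4 else l.getD j 0 := by
  induction L generalizing l with
  | nil => simp
  | cons a L ih =>
      simp only [List.foldl_cons]
      rw [ih _ (by by_cases hp : P a <;> simp [hp, hj])]
      by_cases hm : j ∈ L ∧ P j
      · simp [hm]
      · rw [if_neg hm]
        by_cases hja : j = a
        · subst hja
          by_cases hp : P j
          · simp [hp, List.getD_eq_getElem?_getD, hj]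
          · simp [hp]
        · have h1 : (if P a then l.set a 4 else l).getD j 0 = l.getD j 0 := by
            by_cases hp : P a
            · simp [hp, List.getD_eq_getElem?_getD, List.getElem?_set_ne (Ne.symm hja)]
            · simp [hp]
          have h2 : ¬ (j ∈ a :: L ∧ P j) := by
            rintro ⟨hmem, hpj⟩
            exact hm ⟨(List.mem_cons.mp hmem).resolve_left hja, hpj⟩
          rw [h1, if_neg h2]

-- pointwise value of the outer fill loop (rows set at most once: L has no duplicates)
theorem outer_fill_getD (inner : List Int → List Int) (L : List Nat) (out : List (List Int))
    (j : Nat) :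
    L.Nodup → j < out.length →
    ((L.foldl (fun out r => out.set r (inner (out.getD r []))) out).getD j []) =
      if j ∈ L then inner (out.getD j []) else out.getD j [] := by
  induction L generalizing out with
  | nil => intro _ _; simp
  | cons a L ih =>
      intro hL hj
      simp only [List.foldl_cons]
      rw [ih _ hL.of_cons (by simpa using hj)]
      by_cases hja : j = a
      · subst hja
        have hnot : j ∉ L := (List.nodup_cons.mp hL).1
        simp [hnot, List.getD_eq_getElem?_getD, hj]
      · have h1 : (out.set a (inner (out.getD a []))).getD j [] = out.getD j [] := by
          simp [List.getD_eq_getElem?_getD, List.getElem?_set_ne (Ne.symm hja)]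
        rw [h1]
        by_cases hm : j ∈ L
        · simp [hm]
        · simp [hm, hja]

-- the inner fill loop, run on a zero row, is the template row
theorem inner_fill_eq_template (P : Nat → Prop) [DecidablePred P] (cols : Nat) :
    (List.range cols).foldl (fun row c => if P c then row.set c 4 else row)
        (List.replicate cols (0 : Int)) =
      (List.range cols).map (fun c => if P c then (4 : Int) else 0) := by
  have hlen : ((List.range cols).foldl (fun row c => if P c then row.set c 4 else row)
      (List.replicate cols (0 : Int))).length = cols := by
    rw [foldl_set_length]
    · simp
    · intro l i; by_cases hp : P i <;> simp [hp]
  apply List.ext_getElem (by simp [hlen])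
  intro j h1 h2
  have hj : j < cols := by simpa [hlen] using h1
  have key := inner_fill_getD P (List.range cols) (List.replicate cols (0 : Int)) j (by simpa)
  simp only [List.getD_eq_getElem?_getD, List.getElem?_eq_getElem h1] at key
  rw [Option.getD_some] at key
  simp only [List.getElem_map, List.getElem_range]
  rw [key]
  by_cases hp : P j <;> simp [hp, hj]

-- A's whole fill phase equals the replicate form
theorem fill_eq (P : Nat → Prop) [DecidablePred P] (rows cols k : Nat) (hk : k ≤ rows) :
    (List.range k).foldl (fun out r =>
        (List.range cols).foldl (fun out c =>
          if P c then out.set r ((out.getD r []).set c 4) else out) out)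
      (List.replicate rows (List.replicate cols (0 : Int))) =
    List.replicate k ((List.range cols).map (fun c => if P c then (4 : Int) else 0)) ++
      List.replicate (rows - k) (List.replicate cols (0 : Int)) := by
  -- rewrite the body: the inner fold only touches row r
  have hbody : (fun (out : List (List Int)) (r : Nat) =>
      (List.range cols).foldl (fun out c =>
        if P c then out.set r ((out.getD r []).set c 4) else out) out) =
      (fun out r => out.set r
        ((List.range cols).foldl (fun row c => if P c then row.set c 4 else row)
          (out.getD r []))) := by
    funext out r
    induction (List.range cols) generalizing out with
    | nil =>
        simp only [List.foldl_nil]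
        by_cases hr : r < out.length
        · simp [List.getD_eq_getElem?_getD, List.getElem?_eq_getElem hr]
        · rw [List.set_eq_of_length_le (by omega)]
    | cons c cs ih =>
        simp only [List.foldl_cons]
        by_cases hp : P c
        · rw [if_pos hp, if_pos hp, ih]
          by_cases hr : r < out.length
          · simp [List.getD_eq_getElem?_getD, hr, List.set_set]
          · simp [List.set_eq_of_length_le, Nat.le_of_not_lt hr]
        · rw [if_neg hp, if_neg hp, ih]
  rw [hbody]
  have hlenL : ((List.range k).foldl (fun out r =>
      out.set r ((List.range cols).foldl (fun row c => if P c then row.set c 4 else row)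
        (out.getD r [])))
      (List.replicate rows (List.replicate cols (0 : Int)))).length = rows := by
    rw [foldl_set_length] <;> simp
  apply List.ext_getElem
  · rw [hlenL]; simp only [List.length_append, List.length_replicate]; omega
  intro j h1 h2
  have hj : j < rows := hlenL ▸ h1
  have key := outer_fill_getD
    (fun l => (List.range cols).foldl (fun row c => if P c then row.set c 4 else row) l)
    (List.range k) (List.replicate rows (List.replicate cols (0 : Int))) j
    List.nodup_range (by rw [List.length_replicate]; exact hj)
  rw [List.getD_eq_getElem?_getD, List.getElem?_eq_getElem h1, Option.getD_some] at key
  have hz : (List.replicate rows (List.replicate cols (0 : Int))).getD j [] =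
      List.replicate cols (0 : Int) := by
    simp [List.getD_eq_getElem?_getD, hj]
  rw [hz] at key
  rw [key]
  by_cases hjk : j < k
  · rw [if_pos (by simpa using hjk), List.getElem_append_left (by simpa using hjk)]
    simp [inner_fill_eq_template]
  · rw [if_neg (by simpa using hjk), List.getElem_append_right (by simpa using hjk)]
    simp [List.getElem_replicate]

-- reshape: chopping a flat list into rows of length cols gives M when values agree pointwise
theorem reshape_eq (fl : List Int) (cols : Nat) (M : List (List Int))
    (hrow : ∀ r, r < M.length → (M.getD r []).length = cols)
    (hfl : fl.length = M.length * cols)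
    (hpt : ∀ r c, r < M.length → c < cols →
      fl.getD (r * cols + c) 0 = (M.getD r []).getD c 0) :
    (List.range M.length).map (fun r => (fl.drop (r * cols)).take cols) = M := by
  apply List.ext_getElem (by simp)
  intro r h1 h2
  have hr : r < M.length := h2
  simp only [List.getElem_map, List.getElem_range]
  have hle : r * cols + cols ≤ M.length * cols := by
    calc r * cols + cols = (r + 1) * cols := by ring
    _ ≤ M.length * cols := Nat.mul_le_mul_right cols (Nat.succ_le_of_lt hr)
  have hrowr : (M.getD r []).length = cols := hrow r hr
  have hMr : M.getD r [] = M[r] := by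
    simp [List.getD_eq_getElem?_getD, List.getElem?_eq_getElem hr]
  apply List.ext_getElem
  · rw [List.length_take, List.length_drop, hfl, ← hMr, hrowr]; omega
  intro c hc1 hc2
  have hc : c < cols := by
    rw [List.length_take] at hc1; omega
  have hidx : r * cols + c < fl.length := by rw [hfl]; omega
  rw [List.getElem_take, List.getElem_drop]
  have key := hpt r c hr hc
  rw [List.getD_eq_getElem?_getD, List.getElem?_eq_getElem hidx, Option.getD_some, hMr,
      List.getD_eq_getElem?_getD, List.getElem?_eq_getElem hc2, Option.getD_some] at key
  exact key

-- row r of A's filled matrix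
theorem A_pre_getD (k rows cols : Nat) (parity : Int) (r : Nat) (hr : r < rows) (hk : k ≤ rows) :
    ((List.replicate k ((List.range cols).map (fun (c : Nat) => if ((c : Int)) % 2 = parity then (4 : Int) else 0)) ++
      List.replicate (rows - k) (List.replicate cols (0 : Int))).getD r []) =
    if r < k then (List.range cols).map (fun (c : Nat) => if ((c : Int)) % 2 = parity then (4 : Int) else 0)
    else List.replicate cols (0 : Int) := by
  rw [List.getD_eq_getElem?_getD]
  by_cases h : r < k
  · rw [List.getElem?_append_left (by simpa using h)]; simp [h]
  · rw [List.getElem?_append_right (by simpa using h)]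
    have hlt : r - k < rows - k := by omega
    simp [h, hlt]

theorem T_getD (cols : Nat) (parity : Int) (c : Nat) (hc : c < cols) :
    ((List.range cols).map (fun (c : Nat) => if ((c : Int)) % 2 = parity then (4 : Int) else 0)).getD c 0 =
      if ((c : Int)) % 2 = parity then (4 : Int) else 0 := by
  rw [List.getD_eq_getElem?_getD]; simp [hc]

-- entry j of B's flat output before the pixel write
theorem outflat0_getD (rows cols k : Nat) (parity : Int) (j : Nat) (hj : j < rows * cols) (hk : k ≤ rows) :
    ((List.range (k * cols)).map (fun (i : Nat) => if ((i % cols : Nat) : Int) % 2 = parity then (4 : Int) else 0)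
       ++ List.replicate (rows * cols - k * cols) (0 : Int)).getD j 0 =
    if j < k * cols then (if ((j % cols : Nat) : Int) % 2 = parity then (4 : Int) else 0) else 0 := by
  rw [List.getD_eq_getElem?_getD]
  by_cases h : j < k * cols
  · rw [List.getElem?_append_left (by simpa using h)]; simp [h]
  · rw [List.getElem?_append_right (by simpa using h)]
    have hkc : k * cols ≤ rows * cols := Nat.mul_le_mul_right _ hk
    have hlt : j - k * cols < rows * cols - k * cols := by omega
    simp [h, hlt]

-- pointwise agreement of B's flat output with A's filled matrix (before the pixel write)
theorem pre_pt (rows cols k : Nat) (parity : Int) (hk : k ≤ rows) (r c : Nat)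
    (hr : r < rows) (hc : c < cols) :
    ((List.range (k * cols)).map (fun (i : Nat) => if ((i % cols : Nat) : Int) % 2 = parity then (4 : Int) else 0)
       ++ List.replicate (rows * cols - k * cols) (0 : Int)).getD (r * cols + c) 0 =
    (((List.replicate k ((List.range cols).map (fun (c : Nat) => if ((c : Int)) % 2 = parity then (4 : Int) else 0)) ++
      List.replicate (rows - k) (List.replicate cols (0 : Int))).getD r []).getD c 0) := by
  have hj : r * cols + c < rows * cols := (rc_lt r cols c rows hc).mpr hr
  rw [outflat0_getD rows cols k parity _ hj hk, A_pre_getD k rows cols parity r hr hk]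
  simp only [rc_lt r cols c k hc]
  by_cases h : r < k
  · simp only [if_pos h]; rw [T_getD cols parity c hc, rc_mod r cols c hc]
  · simp only [if_neg h]; simp


-- Python out[r][c] = v for in-range nonnegative indices
theorem pySet2_natCast (out : List (List Int)) (r c : Nat) (v : Int)
    (hr : r < out.length) (hc : c < (out.getD r []).length) :
    pySet2 out (r : Int) (c : Int) v = out.set r ((out.getD r []).set c v) := by
  unfold pySet2
  have h1 : ¬ ((r : Int) < 0) := by omega
  have h2 : ¬ ((c : Int) < 0) := by omega
  simp only [h1, if_false, Int.toNat_natCast]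
  rw [if_pos ⟨by omega, hr⟩, if_neg h2, if_pos ⟨by omega, hc⟩]
  simp

-- the no-pixel write out[0][-1] = 0 is a no-op on the zero matrix
theorem pySet2_zeros (rows cols : Nat) (hr : 0 < rows) (hc : 0 < cols) :
    pySet2 (List.replicate rows (List.replicate cols (0 : Int))) 0 (-1) 0
      = List.replicate rows (List.replicate cols (0 : Int)) := by
  unfold pySet2
  simp only [List.length_replicate]
  norm_num
  intro _
  have hget : (List.replicate rows (List.replicate cols (0 : Int)))[0]?.getD []
      = List.replicate cols (0 : Int) := by
    simp [hr]
  rw [hget]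
  simp only [List.length_replicate]
  rw [if_pos (by constructor <;> omega)]
  rw [List.set_replicate_self, List.set_replicate_self]

-- ===== VERDICT (by name: the statement is the Claim_ definition above) =====
theorem solve_834ec97d_spec : Claim_equal_solve_834ec97d := by
  intro grid _ hpre
  obtain ⟨hne, hcpos, -⟩ := hpre
  unfold Spec_solve_834ec97d solve_834ec97d solve_834ec97d_alt
  simp only
  set rows := grid.length with hrows
  set cols := (grid.headD []).length with hcols
  have hrpos : 0 < rows := List.length_pos_of_ne_nil hne
  set flat := grid.flatMap (fun row => (List.range cols).map (fun c => row.getD c 0)) with hflat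
  have hflen : flat.length = rows * cols := flat_length grid cols
  -- A's nested last-hit fold as a reverse findSome?
  have hin : ∀ (r : Nat) (st : Int × Int × Int),
      (List.range cols).foldl (fun st (c : Nat) =>
          if (grid.getD r []).getD c 0 ≠ 0 then ((r : Int), (c : Int), (grid.getD r []).getD c 0)
          else st) st =
        ((List.range cols).reverse.findSome? (fun c =>
          if (grid.getD r []).getD c 0 ≠ 0 then some ((r : Int), (c : Int), (grid.getD r []).getD c 0)
          else none)).getD st := by
    intro r st
    rw [← foldl_getD_eq_findSome?_reverse]
    congr 1
    funext st' c
    simp only [List.getD_eq_getElem?_getD, ne_eq, ite_not]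
    by_cases h : (grid[r]?.getD [])[c]?.getD (0 : Int) = 0
    · rw [if_pos h, if_pos h]; rfl
    · rw [if_neg h, if_neg h]; rfl
  have hpixA : ((List.range rows).foldl (fun st (r : Nat) =>
      (List.range cols).foldl (fun st (c : Nat) =>
        if (grid.getD r []).getD c 0 ≠ 0 then ((r : Int), (c : Int), (grid.getD r []).getD c 0)
        else st) st) ((-1 : Int), (-1 : Int), (0 : Int))) =
    ((List.range rows).reverse.findSome? (fun r =>
      (List.range cols).reverse.findSome? (fun c =>
        if (grid.getD r []).getD c 0 ≠ 0 then some ((r : Int), (c : Int), (grid.getD r []).getD c 0)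
        else none))).getD (-1, -1, 0) := by
    rw [← foldl_getD_eq_findSome?_reverse]
    congr 1
    funext st r
    rw [hin]
  -- the nested reverse search is the flat reverse search, re-coordinatised by divmod
  have hcorr : ((List.range rows).reverse.findSome? (fun r =>
      (List.range cols).reverse.findSome? (fun c =>
        if (grid.getD r []).getD c 0 ≠ 0 then some ((r : Int), (c : Int), (grid.getD r []).getD c 0)
        else none))) =
      ((List.range (rows * cols)).reverse.find? (fun i => flat.getD i 0 != 0)).map
        (fun i => (((i / cols : Nat) : Int), ((i % cols : Nat) : Int), flat.getD i 0)) := by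
    rw [← findSome?_ite]
    rw [range_mul_flatMap rows cols, List.reverse_flatMap, findSome?_flatMap]
    apply findSome?_congr
    intro r _
    simp only [Function.comp_apply]
    rw [← List.map_reverse, List.findSome?_map]
    apply findSome?_congr
    intro c hcmem
    have hc' : c < cols := by
      have := List.mem_reverse.mp hcmem
      simpa using this
    simp only [Function.comp]
    rw [hflat, flat_getD grid cols r c hc', rc_div r cols c hc', rc_mod r cols c hc']
    by_cases h0 : (grid.getD r []).getD c 0 = 0 <;> simp [h0]
  rw [hpixA, hcorr]
  cases hfind : (List.range (rows * cols)).reverse.find? (fun i => flat.getD i 0 != 0) with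
  | none =>
      simp only [Option.map_none, Option.getD_none]
      have h1c : (1 : Int) ≤ (cols : Int) := by exact_mod_cast hcpos
      have hfd : PySem.Int.floordiv (-1) (cols : Int) = -1 := by
        rw [PySem.Int.floordiv_eq_iff_of_pos (by omega)]
        constructor
        · nlinarith
        · norm_num
      have hmd : PySem.Int.mod (-1) (cols : Int) = (cols : Int) - 1 := by
        have h := PySem.Int.floordiv_mul_add_mod (-1) (cols : Int)
        rw [hfd] at h; linarith
      have e1 : ((-1 : Int) + 1) = 0 := by norm_num
      rw [hfd, hmd, e1]
      have h0r : ((0 : Int) < (rows : Int)) := by exact_mod_cast hrpos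
      rw [if_pos h0r, if_pos h0r]
      simp only [Int.toNat_zero, List.range_zero, List.foldl_nil, Int.zero_mul,
        List.map_nil, List.nil_append, Nat.sub_zero, Nat.zero_add, zero_add]
      rw [if_neg (show ¬ ((0 : Int) ≤ -1) by norm_num), List.set_replicate_self]
      rw [pySet2_zeros rows cols hrpos hcpos]
      have hres := reshape_eq (List.replicate (rows * cols) (0 : Int)) cols
          (List.replicate rows (List.replicate cols (0 : Int)))
          (by
            intro r hr
            simp only [List.length_replicate] at hr
            simp [List.getD_eq_getElem?_getD, List.getElem?_replicate, hr])
          (by simp)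
          (by
            intro r c hr hc
            simp only [List.length_replicate] at hr
            have hj : r * cols + c < rows * cols := (rc_lt r cols c rows hc).mpr hr
            simp [List.getD_eq_getElem?_getD, List.getElem?_replicate, hj, hr, hc])
      rw [List.length_replicate] at hres
      exact hres.symm
  | some i =>
      have hi : i < rows * cols := by
        have := List.mem_of_find?_eq_some hfind
        simpa using this
      rw [show (Option.map (fun j : Nat => (((j / cols : Nat) : Int), ((j % cols : Nat) : Int), flat.getD j 0)) (some i)).getD ((-1 : Int), (-1 : Int), (0 : Int)) = (((i / cols : Nat) : Int), ((i % cols : Nat) : Int), flat.getD i 0) from rfl]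
      rw [show ((((i / cols : Nat) : Int), ((i % cols : Nat) : Int), flat.getD i 0)).1 = ((i / cols : Nat) : Int) from rfl,
          show ((((i / cols : Nat) : Int), ((i % cols : Nat) : Int), flat.getD i 0)).2.1 = ((i % cols : Nat) : Int) from rfl,
          show ((((i / cols : Nat) : Int), ((i % cols : Nat) : Int), flat.getD i 0)).2.2 = flat.getD i 0 from rfl]
      set R := i / cols with hRdef
      set C := i % cols with hCdef
      have hCc : C < cols := Nat.mod_lt _ hcpos
      have hRr : R < rows := by
        rw [hRdef]; exact (Nat.div_lt_iff_lt_mul hcpos).mpr hi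
      have efd : PySem.Int.floordiv (i : Int) (cols : Int) = (R : Int) := by
        rw [hRdef]; exact_mod_cast PySem.Int.floordiv_natCast i cols
      have emd : PySem.Int.mod (i : Int) (cols : Int) = (C : Int) := by
        rw [hCdef]; exact_mod_cast PySem.Int.mod_natCast i cols
      clear_value R C
      clear hRdef hCdef
      set v := flat.getD i 0 with hvdef
      set parity := PySem.Int.mod (C : Int) 2 with hparity
      -- A side: normalise indices and apply fill_eq
      have eR1 : ((R : Int) + 1).toNat = R + 1 := by omega
      have eRcast : ((R : Int) + 1) = ((R + 1 : Nat) : Int) := by push_cast; ring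
      have hfillA := fill_eq (fun c => ((c : Int)) % 2 = parity) rows cols (R + 1) hRr
      simp only [] at hfillA
      -- B side: divmod of a nonnegative index
      have efilled : (((R : Int) + 1) * (cols : Int)).toNat = (R + 1) * cols := by
        rw [eRcast, show (((R + 1 : Nat) : Int)) * ((cols : Nat) : Int) = (((R + 1) * cols : Nat) : Int) from by push_cast; ring, Int.toNat_natCast]
      rw [efd, emd, eR1, hfillA]
      rw [if_pos (Int.natCast_nonneg i), Int.toNat_natCast, efilled, Int.toNat_natCast]
      by_cases hlast : R + 1 < rows
      · have hcondi : ((R : Int) + 1 < (rows : Int)) := by omega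
        rw [if_pos hcondi, if_pos hcondi]
        rw [eRcast, pySet2_natCast _ (R + 1) C v
          (by simp only [List.length_set, List.length_append, List.length_replicate]; omega)
          (by
            rw [A_pre_getD (R + 1) rows cols parity (R + 1) hlast hRr, if_neg (by omega)]
            simpa using hCc)]
        rw [A_pre_getD (R + 1) rows cols parity (R + 1) hlast hRr, if_neg (by omega)]
        -- B = the same matrix, via reshape_eq
        have hkc : (R + 1) * cols ≤ rows * cols := Nat.mul_le_mul_right _ hRr
        set T := (List.range cols).map (fun (c : Nat) => if ((c : Int)) % 2 = parity then (4 : Int) else 0) with hT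
        set Z0 := List.replicate cols (0 : Int) with hZ0
        set M := (List.replicate (R + 1) T ++ List.replicate (rows - (R + 1)) Z0).set (R + 1) (Z0.set C v) with hM
        have hMlen : M.length = rows := by
          rw [hM]; simp only [List.length_set, List.length_append, List.length_replicate]; omega
        have hMrow : ∀ r, r < rows → M.getD r [] =
            if r = R + 1 then Z0.set C v else if r < R + 1 then T else Z0 := by
          intro r hr
          by_cases hreq : r = R + 1
          · subst hreq
            rw [hM, List.getD_eq_getElem?_getD, List.getElem?_set_self (by simp only [List.length_append, List.length_replicate]; omega)]
            simp
          · rw [hM, List.getD_eq_getElem?_getD, List.getElem?_set_ne (by omega), ← List.getD_eq_getElem?_getD,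
                A_pre_getD (R + 1) rows cols parity r hr hRr]
            rw [if_neg hreq, hT, hZ0]
        have hres := reshape_eq
            (((List.range ((R + 1) * cols)).map (fun (i : Nat) => if ((i % cols : Nat) : Int) % 2 = parity then (4 : Int) else 0)
              ++ List.replicate (rows * cols - (R + 1) * cols) (0 : Int)).set ((R + 1) * cols + C) v)
            cols M
            (by
              intro r hr
              rw [hMlen] at hr
              rw [hMrow r hr]
              split_ifs <;> simp [hT, hZ0])
            (by
              rw [hMlen]
              simp only [List.length_set, List.length_append, List.length_map, List.length_range, List.length_replicate]
              omega)
            (by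
              intro r c hr hc
              rw [hMlen] at hr
              have hj : r * cols + c < rows * cols := (rc_lt r cols c rows hc).mpr hr
              by_cases hrc : r = R + 1 ∧ c = C
              · obtain ⟨rfl, rfl⟩ := hrc
                rw [List.getD_eq_getElem?_getD, List.getElem?_set_self (by
                    simp only [List.length_append, List.length_map, List.length_range, List.length_replicate]; omega)]
                rw [hMrow _ hr, if_pos rfl]
                simp [hZ0, List.getD_eq_getElem?_getD, List.getElem?_set_self, hCc]
              · have hne : r * cols + c ≠ (R + 1) * cols + C := by
                  intro h; exact hrc ((rc_eq r cols c (R + 1) C hc hCc).mp h)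
                rw [List.getD_eq_getElem?_getD, List.getElem?_set_ne (Ne.symm hne), ← List.getD_eq_getElem?_getD]
                rw [pre_pt rows cols (R + 1) parity hRr r c hr hc]
                rw [hMrow r hr]
                by_cases hreq : r = R + 1
                · subst hreq
                  have hcC : c ≠ C := fun h => hrc ⟨rfl, h⟩
                  rw [if_pos rfl, A_pre_getD (R + 1) rows cols parity (R + 1) hr hRr, if_neg (by omega), hZ0]
                  simp [List.getD_eq_getElem?_getD, hc,
                    List.getElem_set_ne (show C ≠ c from fun h => hcC h.symm)]
                · rw [if_neg hreq, A_pre_getD (R + 1) rows cols parity r hr hRr])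
        rw [hMlen] at hres
        exact hres.symm
      · have hcondi : ¬ ((R : Int) + 1 < (rows : Int)) := by omega
        rw [if_neg hcondi, if_neg hcondi]
        set T := (List.range cols).map (fun (c : Nat) => if ((c : Int)) % 2 = parity then (4 : Int) else 0) with hT
        set Z0 := List.replicate cols (0 : Int) with hZ0
        set M := List.replicate (R + 1) T ++ List.replicate (rows - (R + 1)) Z0 with hM
        have hMlen : M.length = rows := by
          rw [hM]; simp only [List.length_append, List.length_replicate]; omega
        have hres := reshape_eq
            ((List.range ((R + 1) * cols)).map (fun (i : Nat) => if ((i % cols : Nat) : Int) % 2 = parity then (4 : Int) else 0)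
              ++ List.replicate (rows * cols - (R + 1) * cols) (0 : Int))
            cols M
            (by
              intro r hr
              rw [hMlen] at hr
              rw [hM, A_pre_getD (R + 1) rows cols parity r hr hRr]
              split_ifs <;> simp [hT, hZ0])
            (by
              rw [hMlen]
              have : (R + 1) * cols ≤ rows * cols := Nat.mul_le_mul_right _ hRr
              simp only [List.length_append, List.length_map, List.length_range, List.length_replicate]
              omega)
            (by
              intro r c hr hc
              rw [hMlen] at hr
              rw [hM]
              exact pre_pt rows cols (R + 1) parity hRr r c hr hc)
        rw [hMlen] at hres
        exact hres.symm
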